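-- pv_equiv track=rewrite | github.com/thu-nics/CLAP-triangle-counting | reorder_preprocess/force_order_demo/demonstration.py | community_preprocessing
-- ===== SOURCE A (Python) =====
-- from typing import Any, Optional, Tuple, List, Set, Dict, Union
--
-- def community_preprocessing(comm_dict: Dict = None, avg_degree: float = 10):
--     """
--     comm_dict: key: node index value: the community index this node belongs to
--     return
--     comm_mapping: mapping used to convert unconsecutive community index into consecutive number
--     comm_list: each element of this list is a community containing all node in this community
--     """
--     comm_set = set()
--     comm_mapping = dict()
--     comm_list = list()
--
--     for node in comm_dict:
--         if comm_dict[node] not in comm_set: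
--             comm_mapping[comm_dict[node]] = len(comm_set)
--             comm_set.add(comm_dict[node])
--             comm_list.append([])
--         comm_list[comm_mapping[comm_dict[node]]].append(node)
--     return comm_mapping, comm_list
-- ===== SOURCE B (Python) =====
-- def community_preprocessing(comm_dict=None, avg_degree=10):
--     # Two-phase rewrite: first compute the ordered distinct community ids and
--     # their consecutive indices, then a separate grouping pass over the nodes.
--     uniq = list(dict.fromkeys(comm_dict[n] for n in comm_dict))
--     comm_mapping = {c: i for i, c in enumerate(uniq)}
--     comm_list = [[] for _ in uniq]
--     for node in comm_dict:
--         comm_list[comm_mapping[comm_dict[node]]].append(node)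
--     return comm_mapping, comm_list
-- ===== Notes on version B (the rewrite author's own statement) =====
-- stated objective: alternative
-- what changed: Replaces A's single interleaved pass (set membership test, lazy mapping insertion and lazy list growth per node) by two separate phases: one pass that computes the ordered distinct community ids via dict.fromkeys and builds the whole mapping and a preallocated list of empty groups, then an independent grouping pass appending each node.
import Mathlib
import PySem

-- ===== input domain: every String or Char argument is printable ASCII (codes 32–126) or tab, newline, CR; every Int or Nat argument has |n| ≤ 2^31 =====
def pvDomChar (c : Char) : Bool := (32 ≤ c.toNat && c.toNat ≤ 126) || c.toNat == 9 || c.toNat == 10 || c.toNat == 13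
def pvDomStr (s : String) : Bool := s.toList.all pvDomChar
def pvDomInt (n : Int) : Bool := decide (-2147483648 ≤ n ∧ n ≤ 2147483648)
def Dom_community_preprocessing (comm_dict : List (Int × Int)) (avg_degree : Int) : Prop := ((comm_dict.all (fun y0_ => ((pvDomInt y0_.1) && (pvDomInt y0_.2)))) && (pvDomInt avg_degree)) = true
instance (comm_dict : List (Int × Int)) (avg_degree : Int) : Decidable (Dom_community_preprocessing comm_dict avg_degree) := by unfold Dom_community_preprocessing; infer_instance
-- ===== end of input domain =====

-- B splits A's single interleaved pass into an index-building phase (ordered distinct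
-- community ids via dict.fromkeys, full mapping, preallocated empty groups) followed by a
-- separate grouping pass; same return value, proved equal on the whole domain.


-- ===== PORT A =====
-- comm_list[i].append(node): exact for 0 ≤ i < L.length, which always holds here
-- (the index is a mapping value, i.e. a previously recorded length of the growing list)
def pvAppendAt (L : List (List Int)) (i : Int) (x : Int) : List (List Int) :=
  L.modify i.toNat (fun g => g ++ [x])

-- the body of A's loop over the nodes; state = (comm_set, comm_mapping, comm_list)
def pvStepA (d : PySem.Dict Int Int)
    (st : PySem.Set Int × PySem.Dict Int Int × List (List Int)) (node : Int) :
    PySem.Set Int × PySem.Dict Int Int × List (List Int) :=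
  let c := d.getD node 0
  let st' :=
    if PySem.Set.contains st.1 c then st
    else (PySem.Set.add st.1 c, st.2.1.insert c (PySem.Set.len st.1), st.2.2 ++ [[]])
  (st'.1, st'.2.1, pvAppendAt st'.2.2 (st'.2.1.getD c 0) node)

def community_preprocessing (comm_dict : List (Int × Int)) (avg_degree : Int) :
    (List (Int × Int)) × List (List Int) :=
  let d := PySem.Dict.ofList comm_dict
  let fin := d.keys.foldl (pvStepA d) (PySem.Set.empty, PySem.Dict.empty, [])
  (fin.2.1.items, fin.2.2)

-- ===== PORT B =====
-- {c: i for i, c in enumerate(uniq)}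
def pvMdict (u : List Int) : PySem.Dict Int Int :=
  (PySem.List.enumerate u).foldl (fun md p => md.insert p.2 p.1) PySem.Dict.empty

def community_preprocessing_alt (comm_dict : List (Int × Int)) (avg_degree : Int) :
    (List (Int × Int)) × List (List Int) :=
  let d := PySem.Dict.ofList comm_dict
  let uniq := PySem.List.dedup (d.keys.map (fun n => d.getD n 0))
  let m := pvMdict uniq
  let L := d.keys.foldl
    (fun L node => pvAppendAt L (m.getD (d.getD node 0) 0) node)
    (uniq.map (fun _ => ([] : List Int)))
  (m.items, L)

-- ===== PRECONDITION & SPEC =====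
def Spec_community_preprocessing (comm_dict : List (Int × Int)) (avg_degree : Int) (out : (List (Int × Int)) × List (List Int)) : Prop := out = community_preprocessing_alt comm_dict avg_degree
instance (comm_dict : List (Int × Int)) (avg_degree : Int) (out : (List (Int × Int)) × List (List Int)) : Decidable (Spec_community_preprocessing comm_dict avg_degree out) := by unfold Spec_community_preprocessing; infer_instance

-- ===== CLAIM (what is proved, stated in full; the proofs are below) =====
def Claim_equal_community_preprocessing : Prop := ∀ (comm_dict : List (Int × Int)) (avg_degree : Int), Dom_community_preprocessing comm_dict avg_degree → Spec_community_preprocessing comm_dict avg_degree (community_preprocessing comm_dict avg_degree)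

-- ===== LEMMAS AND PROOFS =====

-- groups of a node list ks under community function f, one group per community of u
def pvGroups (f : Int → Int) (ks u : List Int) : List (List Int) :=
  u.map (fun c => ks.filter (fun n => f n == c))

theorem pvMdict_items (u : List Int) (hu : u.Nodup) :
    (pvMdict u).items = (PySem.List.enumerate u).map (fun p => (p.2, p.1)) := by
  have h := PySem.Dict.items_foldl_insert_fresh (PySem.List.enumerate u)
    (fun p => p.2) (fun p => p.1) PySem.Dict.empty
    (fun a _ => by simp [PySem.Dict.contains_empty])
    (by rw [PySem.List.map_snd_enumerate]; exact hu)
  simpa [PySem.Dict.items] using h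

theorem pvMdict_keys_nodup (u : List Int) : (pvMdict u).keys.Nodup := by
  exact PySem.Dict.nodup_keys_foldl_insert_key _ _ _ _ (by simp [PySem.Dict.keys_empty])

theorem pvMdict_getD (u : List Int) (hu : u.Nodup) (c : Int) (hc : c ∈ u) :
    (pvMdict u).getD c 0 = (u.idxOf c : Int) := by
  have hlt : u.idxOf c < u.length := List.idxOf_lt_length_of_mem hc
  have hmem : ((u.idxOf c : Int), c) ∈ PySem.List.enumerate u := by
    rw [PySem.List.mem_enumerate_iff]
    exact ⟨u.idxOf c, hlt, by simp⟩
  exact PySem.Dict.getD_of_mem_items _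
    (by rw [pvMdict_items u hu]; exact List.mem_map_of_mem (f := fun p => (p.2, p.1)) hmem)
    (pvMdict_keys_nodup u) 0

theorem pvMdict_snoc (u : List Int) (c : Int) :
    pvMdict (u ++ [c]) = (pvMdict u).insert c (u.length : Int) := by
  unfold pvMdict
  rw [PySem.List.enumerate_append, List.foldl_append]
  simp [PySem.List.enumerate]
theorem pv_map_modify_idxOf (u : List Int) (hu : u.Nodup) (c : Int) (hc : c ∈ u)
    (g : Int → List Int) (x : Int) :
    (u.map g).modify (u.idxOf c) (fun l => l ++ [x])
      = u.map (fun c' => if c' = c then g c' ++ [x] else g c') := by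
  induction u with
  | nil => cases hc
  | cons a u ih =>
    by_cases hac : a = c
    · subst hac
      simp [List.idxOf_cons_self, List.modify]
      intro c' hc' h; subst h
      exact absurd hc' (List.nodup_cons.1 hu).1
    · have : u.idxOf c + 1 = (a :: u).idxOf c := by
        simp [hac]
      rw [← this]
      simp only [List.map_cons, List.modify_succ_cons]
      rw [ih (List.nodup_cons.1 hu).2 (by cases hc with | head => exact absurd rfl hac | tail _ h => exact h)]
      simp [hac]

theorem pvGroups_snoc1 (f : Int → Int) (ks u : List Int) (k : Int) :
    (u.map (fun c => (ks ++ [k]).filter (fun n => f n == c)))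
      = u.map (fun c' => if c' = f k then ks.filter (fun n => f n == c') ++ [k]
                         else ks.filter (fun n => f n == c')) := by
  apply List.map_congr_left
  intro c' _
  rw [List.filter_append]
  by_cases h : c' = f k
  · simp [List.filter, h]
  · have hb : (f k == c') = false := by
      simp only [beq_eq_false_iff_ne]; exact fun e => h e.symm
    simp [List.filter, hb, h]
theorem pv_foldB_eq (f : Int → Int) (u : List Int) (hu : u.Nodup)
    (p : List Int) (hp : ∀ k ∈ p, f k ∈ u) :
    p.foldl (fun L node => pvAppendAt L ((pvMdict u).getD (f node) 0) node)
        (u.map (fun _ => ([] : List Int)))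
      = pvGroups f p u := by
  induction p using List.reverseRecOn with
  | nil => simp [pvGroups]
  | append_singleton p k ih =>
    rw [List.foldl_append, List.foldl_cons, List.foldl_nil]
    have hk : f k ∈ u := hp k (by simp)
    rw [ih (fun a ha => hp a (by simp [ha]))]
    unfold pvGroups pvAppendAt
    rw [pvMdict_getD u hu _ hk]
    rw [show ((u.idxOf (f k) : Int)).toNat = u.idxOf (f k) from by simp]
    rw [pv_map_modify_idxOf u hu _ hk, pvGroups_snoc1]
theorem pv_modify_append_length (G : List (List Int)) (t : List Int) (f : List Int → List Int) :
    (G ++ [t]).modify G.length f = G ++ [f t] := by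
  induction G with
  | nil => simp [List.modify]
  | cons a G ih => simpa [List.modify_succ_cons] using ih


def pvStepF (f : Int → Int)
    (st : PySem.Set Int × PySem.Dict Int Int × List (List Int)) (node : Int) :
    PySem.Set Int × PySem.Dict Int Int × List (List Int) :=
  let c := f node
  let st' :=
    if PySem.Set.contains st.1 c then st
    else (PySem.Set.add st.1 c, st.2.1.insert c (PySem.Set.len st.1), st.2.2 ++ [[]])
  (st'.1, st'.2.1, pvAppendAt st'.2.2 (st'.2.1.getD c 0) node)

theorem pv_stepA_eq (d : PySem.Dict Int Int) : pvStepA d = pvStepF (fun n => d.getD n 0) := rfl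

theorem pv_foldF_eq (f : Int → Int) (ks : List Int) :
    ks.foldl (pvStepF f) (PySem.Set.empty, PySem.Dict.empty, [])
      = (PySem.Set.ofList (ks.map f),
         pvMdict (PySem.Set.ofList (ks.map f)),
         pvGroups f ks (PySem.Set.ofList (ks.map f))) := by
  induction ks using List.reverseRecOn with
  | nil => rfl
  | append_singleton ks k ih =>
    rw [List.foldl_append, List.foldl_cons, List.foldl_nil, ih,
      show List.map f (ks ++ [k]) = List.map f ks ++ [f k] from by simp]
    set S := PySem.Set.ofList (ks.map f) with hS
    have hSnodup : S.Nodup := PySem.Set.nodup_ofList _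
    have hSnew : PySem.Set.ofList (List.map f ks ++ [f k]) = PySem.Set.add S (f k) :=
      PySem.Set.ofList_append_singleton _ _
    rw [hSnew]
    unfold pvStepF
    by_cases hc : PySem.Set.contains S (f k) = true
    · have hmem : f k ∈ S := (PySem.Set.contains_iff S (f k)).1 hc
      have hadd : PySem.Set.add S (f k) = S := by simp [PySem.Set.add, hmem]
      rw [hadd]
      simp only [if_pos hc]
      refine Prod.ext rfl (Prod.ext rfl ?_)
      show pvAppendAt (pvGroups f ks S) ((pvMdict S).getD (f k) 0) k = _
      unfold pvAppendAt pvGroups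
      rw [pvMdict_getD S hSnodup _ hmem,
        show ((S.idxOf (f k) : Int)).toNat = S.idxOf (f k) from by simp,
        pv_map_modify_idxOf S hSnodup _ hmem, pvGroups_snoc1]
    · have hnmem : f k ∉ S := fun h => hc ((PySem.Set.contains_iff S (f k)).2 h)
      have hadd : PySem.Set.add S (f k) = S ++ [f k] := by simp [PySem.Set.add, hnmem]
      simp only [if_neg hc]
      have hlen : PySem.Set.len S = (S.length : Int) := rfl
      refine Prod.ext rfl (Prod.ext ?_ ?_)
      · show (pvMdict S).insert (f k) (PySem.Set.len S) = pvMdict (PySem.Set.add S (f k))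
        rw [hadd, pvMdict_snoc, hlen]
      · show pvAppendAt (pvGroups f ks S ++ [[]])
            (((pvMdict S).insert (f k) (PySem.Set.len S)).getD (f k) 0) k = _
        rw [hlen, PySem.Dict.getD_insert_self]
        unfold pvAppendAt
        rw [show ((S.length : Int)).toNat = S.length from by simp,
          show S.length = (pvGroups f ks S).length from by simp [pvGroups],
          pv_modify_append_length]
        show _ = pvGroups f (ks ++ [k]) (PySem.Set.add S (f k))
        rw [hadd]
        unfold pvGroups
        rw [List.map_append]
        congr 1
        · apply List.map_congr_left
          intro c' hc'
          have hne : c' ≠ f k := fun h => hnmem (h ▸ hc')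
          rw [List.filter_append]
          have hb : (f k == c') = false := by
            simp only [beq_eq_false_iff_ne]; exact fun e => hne e.symm
          simp [List.filter, hb]
        · have hnil : ks.filter (fun n => f n == f k) = [] := by
            rw [List.filter_eq_nil_iff]
            intro n hn
            simp only [beq_iff_eq]
            intro h
            exact hnmem ((PySem.Set.mem_ofList _ _).2 (h ▸ List.mem_map_of_mem hn))
          simp [List.filter_append, hnil, List.filter]

theorem pv_foldA_eq (d : PySem.Dict Int Int) (ks : List Int) :
    ks.foldl (pvStepA d) (PySem.Set.empty, PySem.Dict.empty, [])
      = (PySem.Set.ofList (ks.map (fun n => d.getD n 0)),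
         pvMdict (PySem.Set.ofList (ks.map (fun n => d.getD n 0))),
         pvGroups (fun n => d.getD n 0) ks (PySem.Set.ofList (ks.map (fun n => d.getD n 0)))) := by
  rw [pv_stepA_eq, pv_foldF_eq]

-- ===== VERDICT (by name: the statement is the Claim_ definition above) =====
theorem community_preprocessing_spec : Claim_equal_community_preprocessing := by
  intro comm_dict avg_degree _
  unfold Spec_community_preprocessing community_preprocessing community_preprocessing_alt
  simp only [PySem.List.dedup_eq_ofList]
  rw [pv_foldA_eq (PySem.Dict.ofList comm_dict) (PySem.Dict.ofList comm_dict).keys,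
      pv_foldB_eq (fun n => (PySem.Dict.ofList comm_dict).getD n 0) _
        (PySem.Set.nodup_ofList _) (PySem.Dict.ofList comm_dict).keys
        (fun k hk => (PySem.Set.mem_ofList _ _).2 (List.mem_map_of_mem hk))]
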